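-- pv_equiv track=rewrite | github.com/rahul-rathava/Personalized_medicine_plateform- | app/app.py | parse_vcf
-- ===== SOURCE A (Python) =====
-- def parse_vcf(file_text):
--     counts = {'A': 0, 'T': 0, 'G': 0, 'C': 0}
--     variants = []
--     disease_risks = []
--     drug_responses = []
--     treatments = []
--     biomarkers = []
--
--     lines = file_text.strip().split("\n")
--     for line in lines:
--         if line.startswith("#"):
--             continue
--         parts = line.split("\t")
--         if len(parts) < 5:
--             continue
--         ref = parts[3]
--         alt = parts[4]
--         variants.append(f"{ref}>{alt}")
--
--         # Count nucleotides
--         counts[ref] = counts.get(ref, 0) + 1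
--         counts[alt] = counts.get(alt, 0) + 1
--
--         # Sample conditions
--         if ref == "G" and alt == "A":
--             disease_risks.append("Risk of Disease A")
--             biomarkers.append("Gene G mutation → Biomarker X")
--         if ref == "C" and alt == "T":
--             disease_risks.append("Predisposition to Disease B")
--             biomarkers.append("C>T → Possible marker for Disease B")
--         if ref == "A" and alt == "T":
--             drug_responses.append("A>T → Poor response to Drug X")
--             treatments.append("Try alternative to Drug X")
--         if ref == "T" and alt == "G":
--             drug_responses.append("T>G → Good response to Drug Z")
--             treatments.append("Consider Drug Z as primary treatment")
--         if ref == "C" and alt == "G":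
--             drug_responses.append("C>G → Adverse reaction to Drug Y")
--             treatments.append("Avoid Drug Y due to adverse reaction")
--
--     total = sum(counts.values())
--     return counts, total, variants, disease_risks, drug_responses, treatments, biomarkers
-- ===== SOURCE B (Python) =====
-- RISK = {
--     ('G', 'A'): ("Risk of Disease A", "Gene G mutation \u2192 Biomarker X"),
--     ('C', 'T'): ("Predisposition to Disease B", "C>T \u2192 Possible marker for Disease B"),
-- }
-- DRUG = {
--     ('A', 'T'): ("A>T \u2192 Poor response to Drug X", "Try alternative to Drug X"),
--     ('T', 'G'): ("T>G \u2192 Good response to Drug Z", "Consider Drug Z as primary treatment"),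
--     ('C', 'G'): ("C>G \u2192 Adverse reaction to Drug Y", "Avoid Drug Y due to adverse reaction"),
-- }
--
-- def parse_vcf(file_text):
--     # phase 1: extract (ref, alt) records from data lines
--     records = []
--     for line in file_text.strip().split("\n"):
--         if not line.startswith("#"):
--             parts = line.split("\t")
--             if len(parts) >= 5:
--                 records.append((parts[3], parts[4]))
--
--     counts = {'A': 0, 'T': 0, 'G': 0, 'C': 0}
--     for ref, alt in records:
--         for base in (ref, alt):
--             counts[base] = counts.get(base, 0) + 1
--
--     variants = [f"{r}>{a}" for r, a in records]
--     disease_risks = [RISK[p][0] for p in records if p in RISK]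
--     biomarkers = [RISK[p][1] for p in records if p in RISK]
--     drug_responses = [DRUG[p][0] for p in records if p in DRUG]
--     treatments = [DRUG[p][1] for p in records if p in DRUG]
--
--     total = sum(counts.values())
--     return counts, total, variants, disease_risks, drug_responses, treatments, biomarkers
-- ===== Notes on version B (the rewrite author's own statement) =====
-- stated objective: idiomatic
-- what changed: B first extracts the (ref, alt) records in one pass, then derives each output independently: counts by a fold over the records, variants by a map, and the four message lists by table lookups in constant RISK/DRUG dicts keyed by (ref, alt), replacing A's single loop with five inline if-branches.
import Mathlib
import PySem

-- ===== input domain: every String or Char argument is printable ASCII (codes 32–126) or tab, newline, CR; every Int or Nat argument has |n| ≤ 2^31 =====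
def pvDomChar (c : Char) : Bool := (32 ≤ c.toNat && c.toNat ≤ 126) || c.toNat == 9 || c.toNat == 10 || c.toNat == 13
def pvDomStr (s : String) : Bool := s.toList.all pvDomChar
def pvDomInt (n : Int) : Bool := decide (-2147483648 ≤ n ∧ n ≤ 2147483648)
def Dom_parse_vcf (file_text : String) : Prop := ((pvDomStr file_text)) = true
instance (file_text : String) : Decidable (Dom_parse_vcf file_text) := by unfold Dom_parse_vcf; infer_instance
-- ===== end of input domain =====

set_option maxRecDepth 8192


-- B replaces A's five inline if-branches by a record-extraction pass followed by
-- per-output derivations driven by constant (ref, alt) → message tables (idiomatic; same cost).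

-- ===== PORT A =====
-- state: (counts, variants, disease_risks, drug_responses, treatments, biomarkers)
def pvAState := PySem.Dict String Int × List String × List String × List String × List String × List String

def pvAStep (st : pvAState) (line : String) : pvAState :=
  if PySem.Str.startswith line "#" then st
  else
    let parts := (PySem.Str.split? line "\t").getD []
    if parts.length < 5 then st
    else
      let ref := PySem.List.pyGetD parts 3 ""
      let alt := PySem.List.pyGetD parts 4 ""
      let (counts, variants, dis, drg, trt, bio) := st
      let variants := variants ++ [ref ++ ">" ++ alt]
      let counts := counts.insert ref (counts.getD ref 0 + 1)
      let counts := counts.insert alt (counts.getD alt 0 + 1)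
      let (dis, bio) :=
        if ref == "G" && alt == "A" then
          (dis ++ ["Risk of Disease A"], bio ++ ["Gene G mutation → Biomarker X"]) else (dis, bio)
      let (dis, bio) :=
        if ref == "C" && alt == "T" then
          (dis ++ ["Predisposition to Disease B"], bio ++ ["C>T → Possible marker for Disease B"]) else (dis, bio)
      let (drg, trt) :=
        if ref == "A" && alt == "T" then
          (drg ++ ["A>T → Poor response to Drug X"], trt ++ ["Try alternative to Drug X"]) else (drg, trt)
      let (drg, trt) :=
        if ref == "T" && alt == "G" then
          (drg ++ ["T>G → Good response to Drug Z"], trt ++ ["Consider Drug Z as primary treatment"]) else (drg, trt)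
      let (drg, trt) :=
        if ref == "C" && alt == "G" then
          (drg ++ ["C>G → Adverse reaction to Drug Y"], trt ++ ["Avoid Drug Y due to adverse reaction"]) else (drg, trt)
      (counts, variants, dis, drg, trt, bio)

def parse_vcf (file_text : String) : (List (String × Int)) × Int × List String × List String × List String × List String × List String :=
  let counts0 : PySem.Dict String Int :=
    PySem.Dict.ofList [("A", 0), ("T", 0), ("G", 0), ("C", 0)]
  let lines := (PySem.Str.split? (PySem.Str.strip file_text) "\n").getD []
  let st := lines.foldl pvAStep (counts0, [], [], [], [], [])
  let (counts, variants, dis, drg, trt, bio) := st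
  let total := counts.values.sum
  (counts.items, total, variants, dis, drg, trt, bio)

-- ===== PORT B =====
def pvRISK : PySem.Dict (String × String) (String × String) :=
  PySem.Dict.ofList
    [ (("G", "A"), ("Risk of Disease A", "Gene G mutation → Biomarker X")),
      (("C", "T"), ("Predisposition to Disease B", "C>T → Possible marker for Disease B")) ]

def pvDRUG : PySem.Dict (String × String) (String × String) :=
  PySem.Dict.ofList
    [ (("A", "T"), ("A>T → Poor response to Drug X", "Try alternative to Drug X")),
      (("T", "G"), ("T>G → Good response to Drug Z", "Consider Drug Z as primary treatment")),
      (("C", "G"), ("C>G → Adverse reaction to Drug Y", "Avoid Drug Y due to adverse reaction")) ]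

def parse_vcf_alt (file_text : String) : (List (String × Int)) × Int × List String × List String × List String × List String × List String :=
  -- phase 1: extract (ref, alt) records from data lines
  let records : List (String × String) :=
    ((PySem.Str.split? (PySem.Str.strip file_text) "\n").getD []).foldl
      (fun acc line =>
        if !(PySem.Str.startswith line "#") then
          let parts := (PySem.Str.split? line "\t").getD []
          if 5 ≤ parts.length then
            acc ++ [(PySem.List.pyGetD parts 3 "", PySem.List.pyGetD parts 4 "")]
          else acc
        else acc) []
  let counts : PySem.Dict String Int :=
    records.foldl
      (fun c p => [p.1, p.2].foldl (fun c b => c.insert b (c.getD b 0 + 1)) c)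
      (PySem.Dict.ofList [("A", 0), ("T", 0), ("G", 0), ("C", 0)])
  let variants := records.map (fun p => p.1 ++ ">" ++ p.2)
  let disease_risks := records.filterMap (fun p => (pvRISK.get? p).map Prod.fst)
  let biomarkers := records.filterMap (fun p => (pvRISK.get? p).map Prod.snd)
  let drug_responses := records.filterMap (fun p => (pvDRUG.get? p).map Prod.fst)
  let treatments := records.filterMap (fun p => (pvDRUG.get? p).map Prod.snd)
  let total := counts.values.sum
  (counts.items, total, variants, disease_risks, drug_responses, treatments, biomarkers)

-- ===== PRECONDITION & SPEC =====
def pvDecEqOut : DecidableEq ((List (String × Int)) × Int × List String × List String × List String × List String × List String) :=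
  @instDecidableEqProd _ _ inferInstance <|
  @instDecidableEqProd _ _ inferInstance <|
  @instDecidableEqProd _ _ inferInstance <|
  @instDecidableEqProd _ _ inferInstance <|
  @instDecidableEqProd _ _ inferInstance <|
  @instDecidableEqProd _ _ inferInstance inferInstance

def Spec_parse_vcf (file_text : String) (out : (List (String × Int)) × Int × List String × List String × List String × List String × List String) : Prop := out = parse_vcf_alt file_text
instance (file_text : String) (out : (List (String × Int)) × Int × List String × List String × List String × List String × List String) : Decidable (Spec_parse_vcf file_text out) := by unfold Spec_parse_vcf; exact pvDecEqOut out _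

-- ===== CLAIM (what is proved, stated in full; the proofs are below) =====
def Claim_equal_parse_vcf : Prop := ∀ (file_text : String), Dom_parse_vcf file_text → Spec_parse_vcf file_text (parse_vcf file_text)

-- ===== LEMMAS AND PROOFS =====

-- the record (ref, alt) a single line contributes, if any
def pvRec? (line : String) : Option (String × String) :=
  if PySem.Str.startswith line "#" then none
  else
    let parts := (PySem.Str.split? line "\t").getD []
    if parts.length < 5 then none
    else some (PySem.List.pyGetD parts 3 "", PySem.List.pyGetD parts 4 "")

def pvCStep (c : PySem.Dict String Int) (p : String × String) : PySem.Dict String Int :=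
  (c.insert p.1 (c.getD p.1 0 + 1)).insert p.2 ((c.insert p.1 (c.getD p.1 0 + 1)).getD p.2 0 + 1)

theorem pvStartswith_false {l : String} (h : ¬ PySem.Str.startswith l "#" = true) :
    PySem.Str.startswith l "#" = false := by
  revert h; cases PySem.Str.startswith l "#" <;> simp

theorem pvStepB_eq (acc : List (String × String)) (l : String) :
    (if !(PySem.Str.startswith l "#") then
        let parts := (PySem.Str.split? l "\t").getD []
        if 5 ≤ parts.length then
          acc ++ [(PySem.List.pyGetD parts 3 "", PySem.List.pyGetD parts 4 "")]
        else acc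
      else acc) = acc ++ (pvRec? l).toList := by
  unfold pvRec?
  by_cases h1 : PySem.Str.startswith l "#" = true
  · rw [h1]
    simp only [Bool.not_true, Bool.false_eq_true, if_false]
    simp
  · rw [pvStartswith_false h1]
    simp only [Bool.not_false]
    rw [if_pos trivial, if_neg Bool.false_ne_true]
    rcases Nat.lt_or_ge ((PySem.Str.split? l "\t").getD []).length 5 with h2 | h2
    · rw [if_neg (by omega), if_pos h2]; simp
    · rw [if_pos h2, if_neg (by omega)]; simp

theorem pvExtract (lines : List String) (acc : List (String × String)) :
    lines.foldl
      (fun acc line =>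
        if !(PySem.Str.startswith line "#") then
          let parts := (PySem.Str.split? line "\t").getD []
          if 5 ≤ parts.length then
            acc ++ [(PySem.List.pyGetD parts 3 "", PySem.List.pyGetD parts 4 "")]
          else acc
        else acc) acc = acc ++ lines.filterMap pvRec? := by
  induction lines generalizing acc with
  | nil => simp
  | cons l ls ih =>
    rw [List.foldl_cons, ih, pvStepB_eq, List.append_assoc]
    cases h : pvRec? l <;> simp [h]

theorem pvRISK_get (p : String × String) :
    pvRISK.get? p =
      if p = ("G", "A") then some ("Risk of Disease A", "Gene G mutation → Biomarker X")
      else if p = ("C", "T") then some ("Predisposition to Disease B", "C>T → Possible marker for Disease B")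
      else none := by
  have hitems : pvRISK.items =
      [(("G", "A"), ("Risk of Disease A", "Gene G mutation → Biomarker X")),
       (("C", "T"), ("Predisposition to Disease B", "C>T → Possible marker for Disease B"))] := by decide
  simp only [PySem.Dict.get?, hitems, List.find?]
  cases hb1 : (("G", "A") == p) <;> cases hb2 : (("C", "T") == p)
  · rw [if_neg (fun h => by subst h; simp at hb1), if_neg (fun h => by subst h; simp at hb2)]
    rfl
  · rw [if_neg (fun h => by subst h; simp at hb1), if_pos (beq_iff_eq.mp hb2).symm]
    rfl
  · rw [if_pos (beq_iff_eq.mp hb1).symm]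
    rfl
  · rw [if_pos (beq_iff_eq.mp hb1).symm]
    rfl

theorem pvDRUG_get (p : String × String) :
    pvDRUG.get? p =
      if p = ("A", "T") then some ("A>T → Poor response to Drug X", "Try alternative to Drug X")
      else if p = ("T", "G") then some ("T>G → Good response to Drug Z", "Consider Drug Z as primary treatment")
      else if p = ("C", "G") then some ("C>G → Adverse reaction to Drug Y", "Avoid Drug Y due to adverse reaction")
      else none := by
  have hitems : pvDRUG.items =
      [(("A", "T"), ("A>T → Poor response to Drug X", "Try alternative to Drug X")),
       (("T", "G"), ("T>G → Good response to Drug Z", "Consider Drug Z as primary treatment")),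
       (("C", "G"), ("C>G → Adverse reaction to Drug Y", "Avoid Drug Y due to adverse reaction"))] := by decide
  simp only [PySem.Dict.get?, hitems, List.find?]
  cases hb1 : (("A", "T") == p) <;> cases hb2 : (("T", "G") == p) <;> cases hb3 : (("C", "G") == p)
  · rw [if_neg (fun h => by subst h; simp at hb1), if_neg (fun h => by subst h; simp at hb2),
       if_neg (fun h => by subst h; simp at hb3)]
    rfl
  · rw [if_neg (fun h => by subst h; simp at hb1), if_neg (fun h => by subst h; simp at hb2),
       if_pos (beq_iff_eq.mp hb3).symm]
    rfl
  · rw [if_neg (fun h => by subst h; simp at hb1), if_pos (beq_iff_eq.mp hb2).symm]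
    rfl
  · rw [if_neg (fun h => by subst h; simp at hb1), if_pos (beq_iff_eq.mp hb2).symm]
    rfl
  · rw [if_pos (beq_iff_eq.mp hb1).symm]
    rfl
  · rw [if_pos (beq_iff_eq.mp hb1).symm]
    rfl
  · rw [if_pos (beq_iff_eq.mp hb1).symm]
    rfl
  · rw [if_pos (beq_iff_eq.mp hb1).symm]
    rfl

theorem pvStep_eq (st : pvAState) (line : String) :
    pvAStep st line =
      match pvRec? line with
      | none => st
      | some p =>
        (pvCStep st.1 p,
         st.2.1 ++ [p.1 ++ ">" ++ p.2],
         st.2.2.1 ++ ((pvRISK.get? p).map Prod.fst).toList,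
         st.2.2.2.1 ++ ((pvDRUG.get? p).map Prod.fst).toList,
         st.2.2.2.2.1 ++ ((pvDRUG.get? p).map Prod.snd).toList,
         st.2.2.2.2.2 ++ ((pvRISK.get? p).map Prod.snd).toList) := by
  obtain ⟨c, v, d, dr, t, b⟩ := st
  unfold pvAStep pvRec?
  by_cases h1 : PySem.Str.startswith line "#" = true
  · rw [h1]; simp
  · rw [pvStartswith_false h1]
    rw [if_neg Bool.false_ne_true, if_neg Bool.false_ne_true]
    rcases Nat.lt_or_ge ((PySem.Str.split? line "\t").getD []).length 5 with h2 | h2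
    · rw [if_pos h2, if_pos h2]
    · rw [if_neg (by omega), if_neg (by omega)]
      set ref := PySem.List.pyGetD ((PySem.Str.split? line "\t").getD []) 3 "" with href
      set alt := PySem.List.pyGetD ((PySem.Str.split? line "\t").getD []) 4 "" with halt
      clear href halt h1 h2
      by_cases hG : ref = "G" <;> by_cases hC : ref = "C" <;>
        by_cases hA : ref = "A" <;> by_cases hT : ref = "T" <;>
        by_cases haA : alt = "A" <;> by_cases haT : alt = "T" <;>
        by_cases haG : alt = "G" <;>
        simp_all [pvCStep, pvRISK_get, pvDRUG_get, Prod.ext_iff]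

theorem pvLoop (lines : List String) (c : PySem.Dict String Int)
    (v d dr t b : List String) :
    lines.foldl pvAStep (c, v, d, dr, t, b) =
      ((lines.filterMap pvRec?).foldl pvCStep c,
       v ++ (lines.filterMap pvRec?).map (fun p => p.1 ++ ">" ++ p.2),
       d ++ (lines.filterMap pvRec?).filterMap (fun p => (pvRISK.get? p).map Prod.fst),
       dr ++ (lines.filterMap pvRec?).filterMap (fun p => (pvDRUG.get? p).map Prod.fst),
       t ++ (lines.filterMap pvRec?).filterMap (fun p => (pvDRUG.get? p).map Prod.snd),
       b ++ (lines.filterMap pvRec?).filterMap (fun p => (pvRISK.get? p).map Prod.snd)) := by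
  induction lines generalizing c v d dr t b with
  | nil => simp
  | cons l ls ih =>
    rw [List.foldl_cons, pvStep_eq]
    cases h : pvRec? l with
    | none => simp [ih, h]
    | some p =>
      simp only [ih, List.filterMap_cons, h]
      cases hr : pvRISK.get? p <;> cases hd : pvDRUG.get? p <;> simp

-- ===== VERDICT (by name: the statement is the Claim_ definition above) =====
theorem parse_vcf_spec : Claim_equal_parse_vcf := by
  intro file_text _
  simp only [Spec_parse_vcf, parse_vcf, parse_vcf_alt]
  rw [pvExtract, pvLoop]
  have hfold : ∀ (rs : List (String × String)) (c : PySem.Dict String Int),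
      rs.foldl (fun c p => [p.1, p.2].foldl (fun c b => c.insert b (c.getD b 0 + 1)) c) c =
        rs.foldl pvCStep c := by
    intro rs c
    apply PySem.List.foldl_congr_mem
    intro c p _
    simp [pvCStep, List.foldl]
  simp only [List.nil_append, hfold]
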